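-- pv_equiv track=rewrite | github.com/raphaelcseb/BackToTheFuture-EP2 | funcoes.py | calcula_pontos_quadra
-- ===== SOURCE A (Python) =====
-- def calcula_pontos_quadra (dados):
--     quadra = False
--
--     numeros = {}
--
--     for dado in dados:
--         if dado not in numeros:
--             numeros[dado] = 0
--         numeros[dado] += 1
--
--     for qtd in numeros.values():
--         if qtd >= 4:
--             quadra = True
--
--     if quadra == True:
--         soma = 0
--         for dado in dados:
--             soma += dado
--         return soma
--
--     else:
--         return 0
-- ===== SOURCE B (Python) =====
-- def calcula_pontos_quadra(dados):
--     s = sorted(dados)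
--     quadra = False
--     run = 0
--     prev = None
--     for v in s:
--         if run > 0 and v == prev:
--             run += 1
--         else:
--             run = 1
--         prev = v
--         if run >= 4:
--             quadra = True
--     return sum(dados) if quadra else 0
-- ===== Notes on version B (the rewrite author's own statement) =====
-- stated objective: alternative
-- what changed: Replaced the dict frequency table and values scan with sort-a-copy (sorted(), argument not mutated) followed by a single run-length scan over consecutive equal values, setting a flag when a run reaches 4.
import Mathlib
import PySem

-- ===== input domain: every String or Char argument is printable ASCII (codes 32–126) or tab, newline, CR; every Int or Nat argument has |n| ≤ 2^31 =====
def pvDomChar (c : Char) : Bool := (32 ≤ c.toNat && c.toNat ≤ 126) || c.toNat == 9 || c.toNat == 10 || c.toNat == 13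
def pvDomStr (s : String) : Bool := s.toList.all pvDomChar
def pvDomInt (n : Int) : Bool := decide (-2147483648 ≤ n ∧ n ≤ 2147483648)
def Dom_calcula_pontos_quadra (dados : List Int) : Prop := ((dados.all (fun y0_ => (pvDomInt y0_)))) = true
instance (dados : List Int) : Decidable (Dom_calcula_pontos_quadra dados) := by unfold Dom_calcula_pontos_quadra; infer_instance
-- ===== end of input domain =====

-- B replaces A's dict frequency table with sorting a copy and a single run-length
-- scan over consecutive equal values (alternative decomposition; not claimed faster).

-- ===== PORT A =====
def calcula_pontos_quadra (dados : List Int) : Int :=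
  let numeros : PySem.Dict Int Int :=
    dados.foldl (fun numeros dado =>
      let numeros := if numeros.contains dado = false then numeros.insert dado 0 else numeros
      numeros.insert dado (numeros.getD dado 0 + 1)) PySem.Dict.empty
  let quadra := numeros.values.foldl (fun quadra qtd => if qtd ≥ 4 then true else quadra) false
  if quadra = true then
    dados.foldl (fun soma dado => soma + dado) 0
  else 0

-- ===== PORT B =====
-- one step of B's run-length scan; state = (quadra, run, prev)
def quadraStep (st : Bool × Int × Option Int) (v : Int) : Bool × Int × Option Int :=
  let run : Int := if st.2.1 > 0 && st.2.2 == some v then st.2.1 + 1 else 1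
  let quadra := if run ≥ 4 then true else st.1
  (quadra, run, some v)

def calcula_pontos_quadra_alt (dados : List Int) : Int :=
  let s := PySem.List.sorted dados (fun x => x) false
  let st := s.foldl quadraStep (false, 0, none)
  if st.1 then dados.sum else 0

-- ===== PRECONDITION & SPEC =====
def Spec_calcula_pontos_quadra (dados : List Int) (out : Int) : Prop := out = calcula_pontos_quadra_alt dados
instance (dados : List Int) (out : Int) : Decidable (Spec_calcula_pontos_quadra dados out) := by unfold Spec_calcula_pontos_quadra; infer_instance

-- ===== CLAIM (what is proved, stated in full; the proofs are below) =====
def Claim_equal_calcula_pontos_quadra : Prop := ∀ (dados : List Int), Dom_calcula_pontos_quadra dados → Spec_calcula_pontos_quadra dados (calcula_pontos_quadra dados)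

-- ===== LEMMAS AND PROOFS =====

-- A's counting loop body is extensionally the Counter step
lemma stepA_eq_counter_step :
    (fun (numeros : PySem.Dict Int Int) (dado : Int) =>
      let numeros := if numeros.contains dado = false then numeros.insert dado 0 else numeros
      numeros.insert dado (numeros.getD dado 0 + 1)) =
    (fun (d : PySem.Dict Int Int) (x : Int) => d.insert x (d.getD x 0 + 1)) := by
  funext d x
  by_cases h : d.contains x
  · simp [h]
  · have h' : d.contains x = false := by simpa using h
    rw [if_pos h']
    dsimp only
    rw [PySem.Dict.getD_insert_self, PySem.Dict.insert_insert_self,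
      PySem.Dict.getD_of_not_contains _ _ h']

lemma numeros_eq_counter (dados : List Int) :
    dados.foldl (fun numeros dado =>
      let numeros := if numeros.contains dado = false then numeros.insert dado 0 else numeros
      numeros.insert dado (numeros.getD dado 0 + 1)) PySem.Dict.empty
    = PySem.Dict.counter dados := by
  rw [stepA_eq_counter_step, PySem.Dict.foldl_insert_getD_add_one_eq_counter]

-- quadra flag of A as a Bool any over dados
lemma quadraA_eq (dados : List Int) :
    ((PySem.Dict.counter dados).values.foldl
      (fun quadra qtd => if qtd ≥ 4 then true else quadra) false)
    = dados.any (fun v => decide (4 ≤ (dados.count v : Int))) := by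
  have hstep : (fun (quadra : Bool) (qtd : Int) => if qtd ≥ 4 then true else quadra)
       = (fun quadra qtd => if (fun q : Int => decide (4 ≤ q)) qtd = true then true else quadra) := by
    funext a c; simp [ge_iff_le]
  rw [hstep, PySem.List.foldl_if_true_eq]
  simp only [Bool.false_or, PySem.Dict.values, PySem.Dict.items_counter, List.map_map,
    List.any_map, Function.comp_def]
  rw [Bool.eq_iff_iff]
  simp only [List.any_eq_true, PySem.Set.mem_ofList, decide_eq_true_eq]

-- appending one element: where a count ≥ 4 appears
lemma any_count_append (t : List Int) (x : Int) :
    (t ++ [x]).any (fun v => decide (4 ≤ ((t ++ [x]).count v : Int))) =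
    (decide (4 ≤ (t.count x : Int) + 1) || t.any (fun v => decide (4 ≤ (t.count v : Int)))) := by
  rw [Bool.eq_iff_iff]
  simp only [List.any_eq_true, List.mem_append, List.mem_singleton, Bool.or_eq_true,
    decide_eq_true_eq, List.count_append, List.count_singleton]
  constructor
  · rintro ⟨v, hv | hv, h4⟩
    · by_cases hvx : v = x
      · subst hvx; left; simp at h4; omega
      · right
        refine ⟨v, hv, ?_⟩
        have hne : ¬((x == v) = true) := fun hh => hvx (eq_of_beq hh).symm
        rw [if_neg hne] at h4
        simpa using h4
    · subst hv; left; simp at h4; omega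
  · rintro (h | ⟨v, hv, h4⟩)
    · refine ⟨x, Or.inr rfl, ?_⟩
      simp; omega
    · refine ⟨v, Or.inl hv, ?_⟩
      split_ifs <;> push_cast at h4 ⊢ <;> omega

-- the scan invariant on a sorted nonempty list
lemma scan_inv (t : List Int) : ∀ (x : Int), (t ++ [x]).Pairwise (· ≤ ·) →
    (t ++ [x]).foldl quadraStep (false, 0, none) =
      ((t ++ [x]).any (fun v => decide (4 ≤ ((t ++ [x]).count v : Int))),
       ((t ++ [x]).count x : Int), some x) := by
  induction t using List.reverseRecOn with
  | nil =>
    intro x h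
    simp [quadraStep]
  | append_singleton t' y ih =>
    intro x h
    have hsort : (t' ++ [y]).Pairwise (· ≤ ·) := (List.pairwise_append.mp h).1
    have hyx : y ≤ x := (List.pairwise_append.mp h).2.2 y (by simp) x (by simp)
    have hA := ih y hsort
    rw [List.foldl_append, hA, List.foldl_cons, List.foldl_nil]
    rw [any_count_append (t' ++ [y]) x]
    by_cases hxy : x = y
    · subst hxy
      have hmem : x ∈ t' ++ [x] := by simp
      have hpos : ((0 : Int) < ((t' ++ [x]).count x : Int)) := by
        have := List.count_pos_iff.mpr hmem
        omega
      simp only [quadraStep, beq_self_eq_true, Bool.and_true, gt_iff_lt, hpos, decide_true,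
        if_pos]
      have hcnt : (((t' ++ [x]) ++ [x]).count x : Int) = ((t' ++ [x]).count x : Int) + 1 := by
        simp [List.count_append]; omega
      refine Prod.ext ?_ (Prod.ext ?_ rfl)
      · show (if ((t' ++ [x]).count x : Int) + 1 ≥ 4 then true else _) = _
        split_ifs with h4
        · simp only [ge_iff_le] at h4; rw [decide_eq_true h4, Bool.true_or]
        · simp only [ge_iff_le] at h4; rw [decide_eq_false h4, Bool.false_or]
      · simpa using hcnt.symm
    · -- x differs from the last element y: x does not occur in t' ++ [y]
      have hnot : x ∉ t' ++ [y] := by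
        intro hmem
        rcases List.mem_append.mp hmem with hin | hin
        · have h1 : x ≤ y := (List.pairwise_append.mp hsort).2.2 x hin y (by simp)
          exact hxy (le_antisymm h1 hyx)
        · simp only [List.mem_singleton] at hin; exact hxy hin
      have hc0 : (t' ++ [y]).count x = 0 := List.count_eq_zero.mpr hnot
      have hbeq : (some y == some x) = false := by
        simp only [beq_eq_false_iff_ne, Ne, Option.some.injEq]
        exact fun hh => hxy hh.symm
      simp only [quadraStep, hbeq, Bool.and_false, Bool.false_eq_true, hc0]
      have hcnt : (((t' ++ [y]) ++ [x]).count x : Int) = 1 := by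
        rw [List.count_append, hc0]; simp
      refine Prod.ext ?_ (Prod.ext ?_ rfl)
      · show (if (1 : Int) ≥ 4 then true else _) = _
        norm_num
      · simpa using hcnt.symm

lemma foldl_add_eq_sum (dados : List Int) :
    dados.foldl (fun soma dado => soma + dado) 0 = dados.sum := by
  rw [List.sum_eq_foldl]

-- B's flag equals A's flag
lemma flags_eq (dados : List Int) :
    ((PySem.List.sorted dados (fun x => x) false).foldl quadraStep (false, 0, none)).1
    = dados.any (fun v => decide (4 ≤ (dados.count v : Int))) := by
  rcases List.eq_nil_or_concat (PySem.List.sorted dados (fun x => x) false) with hnil | ⟨t, x, htx⟩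
  · have : dados = [] := (PySem.List.sorted_eq_nil_iff dados _ _).mp hnil
    subst this; rw [hnil]; simp
  · rw [List.concat_eq_append] at htx
    have hperm : (t ++ [x]).Perm dados := htx ▸ PySem.List.sorted_perm dados _ _
    have hsort : (t ++ [x]).Pairwise (· ≤ ·) := by
      have := PySem.List.sorted_pairwise dados (fun x => x) (κ := Int)
      rw [htx] at this; simpa using this
    rw [htx, scan_inv t x hsort]
    rw [Bool.eq_iff_iff]
    simp only [List.any_eq_true, decide_eq_true_eq]
    constructor
    · rintro ⟨v, hv, h4⟩
      exact ⟨v, hperm.mem_iff.mp hv, by rwa [hperm.count_eq] at h4⟩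
    · rintro ⟨v, hv, h4⟩
      exact ⟨v, hperm.mem_iff.mpr hv, by rwa [hperm.count_eq]⟩

-- ===== VERDICT (by name: the statement is the Claim_ definition above) =====
theorem calcula_pontos_quadra_spec : Claim_equal_calcula_pontos_quadra := by
  intro dados _
  unfold Spec_calcula_pontos_quadra calcula_pontos_quadra calcula_pontos_quadra_alt
  simp only [numeros_eq_counter, quadraA_eq, flags_eq, foldl_add_eq_sum]
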